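-- pv_equiv track=rewrite | github.com/rs929/Cornell-Courses | CS1110/lab14/lab14.py | Richie_Challenge
-- ===== SOURCE A (Python) =====
-- def Richie_Challenge(listo):
--     new = listo[:]
--     if len(listo)%2 != 0:
--         new.append(0)
--     final = []
--     for x in range(0, len(new), 2):
--         y = new[x] + new[x+1]
--         final.append(y)
--     return final
-- ===== SOURCE B (Python) =====
-- from itertools import zip_longest
--
--
-- def Richie_Challenge(listo):
--     it = iter(listo)
--     return [a + b for a, b in zip_longest(it, it, fillvalue=0)]
-- ===== Notes on version B (the rewrite author's own statement) =====
-- stated objective: idiomatic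
-- what changed: Replaces the copy-then-pad list and the explicit range(0,len,2) index loop with the standard zip_longest grouper idiom over a single iterator, fillvalue=0 supplying the odd-tail pad.
import Mathlib
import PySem

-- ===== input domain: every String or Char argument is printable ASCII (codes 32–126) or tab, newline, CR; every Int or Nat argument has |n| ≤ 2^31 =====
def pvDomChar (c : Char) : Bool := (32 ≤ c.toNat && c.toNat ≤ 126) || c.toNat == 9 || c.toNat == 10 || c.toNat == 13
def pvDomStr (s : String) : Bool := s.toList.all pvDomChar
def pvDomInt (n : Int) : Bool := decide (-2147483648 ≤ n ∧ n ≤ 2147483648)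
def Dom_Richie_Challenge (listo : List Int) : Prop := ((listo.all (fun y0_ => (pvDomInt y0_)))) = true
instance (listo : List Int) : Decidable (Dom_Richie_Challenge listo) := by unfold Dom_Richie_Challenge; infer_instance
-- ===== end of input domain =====

-- B replaces A's copy-then-pad list and range(0,len,2) index loop with the zip_longest
-- grouper idiom (pairwise structural recursion), fillvalue 0 padding the odd tail. Idiomatic, same cost.

-- ===== PORT A =====
-- new[x] is always in range here, so pyGetD with default 0 is exact
def Richie_Challenge (listo : List Int) : List Int :=
  let new := listo ++ (if (listo.length : Int) % 2 ≠ 0 then [0] else [])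
  (PySem.List.pyRange 0 (new.length : Int) 2).foldl
    (fun final x => final ++ [PySem.List.pyGetD new x 0 + PySem.List.pyGetD new (x + 1) 0]) []

-- ===== PORT B =====
-- zip_longest(it, it, fillvalue=0) groups the list in consecutive pairs, padding the odd tail with 0
def Richie_Challenge_alt : List Int → List Int
  | [] => []
  | [a] => [a + 0]
  | a :: b :: rest => (a + b) :: Richie_Challenge_alt rest

-- ===== PRECONDITION & SPEC =====
def Spec_Richie_Challenge (listo : List Int) (out : List Int) : Prop := out = Richie_Challenge_alt listo
instance (listo : List Int) (out : List Int) : Decidable (Spec_Richie_Challenge listo out) := by unfold Spec_Richie_Challenge; infer_instance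

-- ===== CLAIM (what is proved, stated in full; the proofs are below) =====
def Claim_equal_Richie_Challenge : Prop := ∀ (listo : List Int), Dom_Richie_Challenge listo → Spec_Richie_Challenge listo (Richie_Challenge listo)

-- ===== LEMMAS AND PROOFS =====

-- alt computes the pairwise sums of an even-length list, expressed through the range/index view of A's loop
theorem key : ∀ (new : List Int), new.length % 2 = 0 →
    (List.range (new.length / 2)).map
      (fun k => new.getD (2 * k) 0 + new.getD (2 * k + 1) 0) = Richie_Challenge_alt new
  | [], _ => by simp [Richie_Challenge_alt]
  | [a], h => by simp at h
  | a :: b :: rest, h => by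
    have hr : rest.length % 2 = 0 := by simp [List.length_cons] at h; omega
    have hlen : (a :: b :: rest).length / 2 = rest.length / 2 + 1 := by
      simp only [List.length_cons]; omega
    rw [hlen, List.range_succ_eq_map, List.map_cons, List.map_map]
    simp only [Function.comp_def]
    have := key rest hr
    simp only [Richie_Challenge_alt]
    rw [← this]
    refine congrArg₂ List.cons rfl ?_
    apply List.map_congr_left
    intro k _
    have e1 : 2 * Nat.succ k = (2 * k + 1) + 1 := by omega
    rw [e1]
    simp

-- padding an odd-length list with a trailing 0 does not change alt's value
theorem alt_pad : ∀ (l : List Int), l.length % 2 = 1 →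
    Richie_Challenge_alt (l ++ [0]) = Richie_Challenge_alt l
  | [], h => by simp at h
  | [a], _ => by simp [Richie_Challenge_alt]
  | a :: b :: rest, h => by
    have hr : rest.length % 2 = 1 := by simp [List.length_cons] at h; omega
    simp only [List.cons_append, Richie_Challenge_alt]
    rw [alt_pad rest hr]

theorem loop_eq (new : List Int) (h : new.length % 2 = 0) :
    (PySem.List.pyRange 0 (new.length : Int) 2).foldl
      (fun final x => final ++ [PySem.List.pyGetD new x 0 + PySem.List.pyGetD new (x + 1) 0]) []
      = Richie_Challenge_alt new := by
  rw [PySem.List.foldl_append_singleton_eq_map]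
  rw [PySem.List.pyRange_of_pos 0 (new.length : Int) (by norm_num)]
  have hif : (if (0 : Int) < (new.length : Int) then
      (((new.length : Int) - 0 + 2 - 1) / 2).toNat else 0) = new.length / 2 := by
    split_ifs with h0
    · omega
    · omega
  rw [hif, List.map_map]
  rw [← key new h]
  simp only [List.nil_append]
  apply List.map_congr_left
  intro k _
  simp only [Function.comp_def]
  have h1 : (0 : Int) + 2 * (k : Int) = ((2 * k : Nat) : Int) := by push_cast; ring
  have h2 : (0 : Int) + 2 * (k : Int) + 1 = ((2 * k + 1 : Nat) : Int) := by push_cast; ring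
  rw [h1]
  rw [PySem.List.pyGetD_natCast]
  rw [show ((2 * k : Nat) : Int) + 1 = ((2 * k + 1 : Nat) : Int) by push_cast; ring]
  rw [PySem.List.pyGetD_natCast]

-- ===== VERDICT (by name: the statement is the Claim_ definition above) =====
theorem Richie_Challenge_spec : Claim_equal_Richie_Challenge := by
  intro listo _
  unfold Spec_Richie_Challenge Richie_Challenge
  by_cases hpar : listo.length % 2 = 0
  · have : ((listo.length : Int) % 2 ≠ 0) = False := by simp; omega
    simp only [this, if_false, List.append_nil]
    exact loop_eq listo hpar
  · have hodd : listo.length % 2 = 1 := by omega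
    have : ((listo.length : Int) % 2 ≠ 0) = True := by simp; omega
    simp only [this, if_true]
    rw [loop_eq (listo ++ [0]) (by simp [Nat.add_mod]; omega)]
    exact alt_pad listo hodd
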